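-- pv_equiv track=rewrite | github.com/victortoma15/toma-victor-stefan-Python | Laborator2/ex9.py | field_spectators
-- ===== SOURCE A (Python) =====
-- def field_spectators(matrix):
--     result = []
--     matrix = list(zip(*matrix))
--     maxim = 0
--     for indexR, row in enumerate(matrix):
--         for indexC, column in enumerate(row):
--             if column > maxim:
--                 maxim = column
--             else:
--                 result.append((indexC, indexR))
--         maxim = 0
--     return result
-- ===== SOURCE B (Python) =====
-- def field_spectators(matrix):
--     out = []
--     for indexR, row in enumerate(zip(*matrix)):
--         # pass 1: prefix-maximum table; pm[k] = max of 0 and all strictly-previous entries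
--         pm = [0]
--         for x in row[:-1]:
--             pm.append(max(pm[-1], x))
--         # pass 2: emit every position not exceeding its prefix maximum
--         out.extend((indexC, indexR) for indexC, (v, p) in enumerate(zip(row, pm)) if v <= p)
--     return out
-- ===== Notes on version B (the rewrite author's own statement) =====
-- stated objective: alternative
-- what changed: Replaces A's single-pass running-max mutation per column by two separate passes: first build a prefix-maximum table (pm[k] = max of 0 and all strictly-previous entries), then filter/emit positions whose value does not exceed their table entry.
import Mathlib
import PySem

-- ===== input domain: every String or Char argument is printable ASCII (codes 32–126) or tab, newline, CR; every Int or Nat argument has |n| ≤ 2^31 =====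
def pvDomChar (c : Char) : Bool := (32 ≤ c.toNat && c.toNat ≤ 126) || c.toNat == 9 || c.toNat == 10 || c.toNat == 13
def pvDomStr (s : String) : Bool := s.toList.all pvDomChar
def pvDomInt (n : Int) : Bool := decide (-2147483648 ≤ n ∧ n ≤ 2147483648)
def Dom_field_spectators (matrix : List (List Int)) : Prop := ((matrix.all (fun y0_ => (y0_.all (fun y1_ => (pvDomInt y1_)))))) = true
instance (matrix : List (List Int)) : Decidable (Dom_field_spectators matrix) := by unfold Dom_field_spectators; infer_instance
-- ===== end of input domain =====

-- B replaces A's in-loop running-max update by a two-pass prefix-maximum table + filter (objective: alternative decomposition, same cost).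

-- ===== PORT A =====
-- exact model of Python's zip(*matrix): truncate all rows to the shortest length and transpose;
-- zip() with no arguments (matrix = []) yields []. Used by both ports, as both Pythons call zip(*matrix).
def zipStar (m : List (List Int)) : List (List Int) :=
  match m with
  | [] => []
  | r :: rs =>
    let n := rs.foldl (fun a l => min a l.length) r.length
    (List.range n).map (fun j => (r :: rs).map (fun row => row.getD j 0))

-- inner loop of A: running max `maxim`, appending (indexC, indexR) when not strictly greater
def innerA (indexR : Nat) : List Int → Nat → List (Int × Int) → Int → List (Int × Int)
  | [], _, result, _ => result
  | column :: rest, indexC, result, maxim =>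
    if column > maxim then innerA indexR rest (indexC + 1) result column
    else innerA indexR rest (indexC + 1) (result ++ [((indexC : Int), (indexR : Int))]) maxim

-- outer loop of A: maxim is reset to 0 before each row
def outerA : List (List Int) → Nat → List (Int × Int) → List (Int × Int)
  | [], _, result => result
  | row :: rest, indexR, result => outerA rest (indexR + 1) (innerA indexR row 0 result 0)

def field_spectators (matrix : List (List Int)) : List (Int × Int) :=
  outerA (zipStar matrix) 0 []

-- ===== PORT B =====
-- pass 1 of B: the prefix-maximum entries appended after the initial 0 (loop `for x in row[:-1]`)
def buildPm : List Int → Int → List Int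
  | [], _ => []
  | x :: t, cur => max cur x :: buildPm t (max cur x)

-- pass 2 of B: walk (row, pm) in parallel with the enumerate counter, emit where v ≤ p
def emitB (indexR : Nat) : List Int → List Int → Nat → List (Int × Int)
  | v :: vs, p :: ps, indexC =>
    (if v ≤ p then [((indexC : Int), (indexR : Int))] else []) ++ emitB indexR vs ps (indexC + 1)
  | _, _, _ => []

def outerB : List (List Int) → Nat → List (Int × Int) → List (Int × Int)
  | [], _, out => out
  | row :: rest, indexR, out =>
    outerB rest (indexR + 1) (out ++ emitB indexR row (0 :: buildPm row.dropLast 0) 0)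

def field_spectators_alt (matrix : List (List Int)) : List (Int × Int) :=
  outerB (zipStar matrix) 0 []

-- ===== PRECONDITION & SPEC =====
def Spec_field_spectators (matrix : List (List Int)) (out : List (Int × Int)) : Prop := out = field_spectators_alt matrix
instance (matrix : List (List Int)) (out : List (Int × Int)) : Decidable (Spec_field_spectators matrix out) := by unfold Spec_field_spectators; infer_instance

-- ===== CLAIM (what is proved, stated in full; the proofs are below) =====
def Claim_equal_field_spectators : Prop := ∀ (matrix : List (List Int)), Dom_field_spectators matrix → Spec_field_spectators matrix (field_spectators matrix)

-- ===== LEMMAS AND PROOFS =====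

-- the prefix-max value seen by each position, defined in lockstep with the row
def pmList : List Int → Int → List Int
  | [], _ => []
  | v :: vs, m => m :: pmList vs (max m v)

lemma innerA_acc (r : Nat) : ∀ (vs : List Int) (k : Nat) (st : List (Int × Int)) (m : Int),
    innerA r vs k st m = st ++ innerA r vs k [] m := by
  intro vs
  induction vs with
  | nil => intro k st m; simp [innerA]
  | cons v t ih =>
    intro k st m
    simp only [innerA]
    split
    · exact ih _ _ _
    · simp only [List.nil_append]
      rw [ih (k + 1) (st ++ [((k : Int), (r : Int))]), ih (k + 1) [((k : Int), (r : Int))]]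
      simp

lemma innerA_eq_emit (r : Nat) : ∀ (vs : List Int) (k : Nat) (m : Int),
    innerA r vs k [] m = emitB r vs (pmList vs m) k := by
  intro vs
  induction vs with
  | nil => intro k m; simp [innerA, emitB]
  | cons v t ih =>
    intro k m
    simp only [innerA, pmList, emitB]
    split
    · rename_i h
      have hm : max m v = v := by omega
      rw [hm, ih]
      have : ¬ v ≤ m := by omega
      simp [this]
    · rename_i h
      have hm : max m v = m := by omega
      have hle : v ≤ m := by omega
      rw [hm, innerA_acc, ih]
      simp [hle]

lemma pmList_eq_buildPm : ∀ (vs : List Int) (m : Int), vs ≠ [] →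
    pmList vs m = m :: buildPm vs.dropLast m := by
  intro vs
  induction vs with
  | nil => intro m h; exact absurd rfl h
  | cons v t ih =>
    intro m _
    cases t with
    | nil => simp [pmList, buildPm]
    | cons w u =>
      rw [show pmList (v :: w :: u) m = m :: pmList (w :: u) (max m v) from rfl,
        ih (max m v) (by simp)]
      rfl

lemma innerA_full (r : Nat) (row : List Int) (st : List (Int × Int)) :
    innerA r row 0 st 0 = st ++ emitB r row (0 :: buildPm row.dropLast 0) 0 := by
  cases row with
  | nil => simp [innerA, emitB]
  | cons v t =>
    rw [innerA_acc, innerA_eq_emit, pmList_eq_buildPm _ _ (by simp)]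

lemma outer_eq : ∀ (rows : List (List Int)) (r : Nat) (st : List (Int × Int)),
    outerA rows r st = outerB rows r st := by
  intro rows
  induction rows with
  | nil => intro r st; rfl
  | cons row rest ih =>
    intro r st
    simp only [outerA, outerB, innerA_full]
    exact ih _ _

-- ===== VERDICT (by name: the statement is the Claim_ definition above) =====
theorem field_spectators_spec : Claim_equal_field_spectators := by
  intro matrix _
  unfold Spec_field_spectators field_spectators field_spectators_alt
  exact outer_eq _ _ _
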